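-- pv_equiv track=rewrite | github.com/tuesdayjz/STEP2023 | week2/beautiful_broccoli_sequence.py | solve
-- ===== SOURCE A (Python) =====
-- def solve(input: str) -> str:
--     min_replace = len(input)
--     for slice in range(len(input) + 1):
--         replace = 0
--         for char in input[slice:]:
--             if char == 'g':
--                 replace += 1
--         for char in input[:slice]:
--             if char == 'w':
--                 replace += 1
--         if replace < min_replace:
--             min_replace = replace
--     return str(min_replace)
-- ===== SOURCE B (Python) =====
-- def solve(input: str) -> str:
--     # One pass: cost of the split before index 0 is the number of 'g's;
--     # moving the split right past a char updates the cost by -1 for 'g', +1 for 'w'.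
--     cost = input.count('g')
--     best = cost
--     for char in input:
--         if char == 'g':
--             cost -= 1
--         elif char == 'w':
--             cost += 1
--         if cost < best:
--             best = cost
--     return str(best)
-- ===== Notes on version B (the rewrite author's own statement) =====
-- stated objective: faster
-- what changed: Replaces the quadratic scan over all splits (recounting both sides for each split) with a single left-to-right pass that maintains the running cost of the current split and its minimum.
import Mathlib
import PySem

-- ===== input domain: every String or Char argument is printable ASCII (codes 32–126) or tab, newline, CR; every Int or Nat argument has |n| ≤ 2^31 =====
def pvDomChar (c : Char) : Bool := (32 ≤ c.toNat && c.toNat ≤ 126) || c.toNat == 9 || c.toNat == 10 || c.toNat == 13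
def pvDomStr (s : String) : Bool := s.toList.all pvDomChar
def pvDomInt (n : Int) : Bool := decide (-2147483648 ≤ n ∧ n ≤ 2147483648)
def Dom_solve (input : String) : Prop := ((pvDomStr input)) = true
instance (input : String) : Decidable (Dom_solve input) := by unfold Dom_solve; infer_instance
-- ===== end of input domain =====

-- B replaces A's quadratic rescan of both sides of every split by one linear pass
-- maintaining the running split cost and its minimum; equal output proved for all inputs.


-- ===== PORT A =====
-- literal transliteration of A: for every split point, recount 'g' on the right and 'w' on the left
def solve (input : String) : String :=
  let l := input.toList
  let n : Int := PySem.Str.len input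
  let min_replace : Int :=
    (PySem.List.pyRange 0 (n + 1) 1).foldl
      (fun min_replace s =>
        let replace : Int :=
          (PySem.List.slice l (some s) none).foldl
            (fun r ch => if ch = 'g' then r + 1 else r) 0
        let replace2 : Int :=
          (PySem.List.slice l none (some s)).foldl
            (fun r ch => if ch = 'w' then r + 1 else r) replace
        if replace2 < min_replace then replace2 else min_replace)
      n
  PySem.Int.toStr min_replace

-- ===== PORT B =====
-- literal transliteration of B: one pass keeping the running cost and its minimum
-- (input.count('g') for the one-character needle is exactly List.count on the chars)
def solve_alt (input : String) : String :=
  let l := input.toList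
  let cost : Int := l.count 'g'
  let r :=
    l.foldl
      (fun (p : Int × Int) ch =>
        let c : Int := if ch = 'g' then p.1 - 1 else if ch = 'w' then p.1 + 1 else p.1
        (c, if c < p.2 then c else p.2))
      (cost, cost)
  PySem.Int.toStr r.2

-- ===== PRECONDITION & SPEC =====
def Spec_solve (input : String) (out : String) : Prop := out = solve_alt input
instance (input : String) (out : String) : Decidable (Spec_solve input out) := by unfold Spec_solve; infer_instance

-- ===== CLAIM (what is proved, stated in full; the proofs are below) =====
def Claim_equal_solve : Prop := ∀ (input : String), Dom_solve input → Spec_solve input (solve input)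

-- ===== LEMMAS AND PROOFS =====

-- number of 'g' / 'w' characters, as an Int
def Gc (l : List Char) : Int := l.countP (fun ch => ch = 'g')
def Wc (l : List Char) : Int := l.countP (fun ch => ch = 'w')

-- cost of the split before index k: 'g's on the right plus 'w's on the left
def fSplit (l : List Char) (k : Nat) : Int := Gc (l.drop k) + Wc (l.take k)

-- recursive characterisation of the minimum split cost
def specMin : List Char → Int
  | [] => 0
  | ch :: t => min (Gc (ch :: t)) ((if ch = 'w' then 1 else 0) + specMin t)

-- proof-side name for B's one-pass step (definitionally the lambda in solve_alt)
def bstep : (Int × Int) → Char → Int × Int := fun p ch =>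
  let c : Int := if ch = 'g' then p.1 - 1 else if ch = 'w' then p.1 + 1 else p.1
  (c, if c < p.2 then c else p.2)

lemma Gc_cons (ch : Char) (t : List Char) :
    Gc (ch :: t) = (if ch = 'g' then 1 else 0) + Gc t := by
  rcases eq_or_ne ch 'g' with h | h <;> simp [Gc, h] <;> omega

lemma Wc_cons (ch : Char) (t : List Char) :
    Wc (ch :: t) = (if ch = 'w' then 1 else 0) + Wc t := by
  rcases eq_or_ne ch 'w' with h | h <;> simp [Wc, h] <;> omega

lemma specMin_le_G (l : List Char) : specMin l ≤ Gc l := by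
  cases l with
  | nil => simp [specMin, Gc]
  | cons ch t => simp [specMin]

lemma Gc_le_len (l : List Char) : Gc l ≤ (l.length : Int) := by
  have := List.countP_le_length (l := l) (p := fun ch => decide (ch = 'g'))
  simp only [Gc]
  exact_mod_cast this

lemma fSplit_zero (l : List Char) : fSplit l 0 = Gc l := by
  simp [fSplit, Wc]

lemma fSplit_succ (ch : Char) (t : List Char) (k : Nat) :
    fSplit (ch :: t) (k + 1) = (if ch = 'w' then 1 else 0) + fSplit t k := by
  simp [fSplit, Wc_cons]
  ring

lemma count_g_eq (l : List Char) : ((l.count 'g' : Nat) : Int) = Gc l := by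
  induction l with
  | nil => simp [Gc]
  | cons ch t ih =>
      rw [Gc_cons]
      rcases eq_or_ne ch 'g' with h | h <;> simp [h] <;> omega

lemma bstep_g (a m : Int) :
    bstep (a, m) 'g' = (a - 1, if a - 1 < m then a - 1 else m) := rfl

lemma bstep_w (a m : Int) :
    bstep (a, m) 'w' = (a + 1, if a + 1 < m then a + 1 else m) := rfl

lemma bstep_o (ch : Char) (a m : Int) (h : ch ≠ 'g') (h2 : ch ≠ 'w') :
    bstep (a, m) ch = (a, if a < m then a else m) := by
  simp [bstep, h, h2]

-- A-side evaluation: the running-minimum fold over all splits is min m (d + specMin l)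
lemma foldl_min_range (l : List Char) : ∀ (d m : Int),
    (List.range (l.length + 1)).foldl (fun m k => min m (d + fSplit l k)) m
      = min m (d + specMin l) := by
  induction l with
  | nil =>
      intro d m
      simp [List.range_succ, specMin, fSplit, Gc, Wc]
  | cons ch t ih =>
      intro d m
      have hr : List.range (t.length + 1 + 1)
          = 0 :: (List.range (t.length + 1)).map Nat.succ := List.range_succ_eq_map
      simp only [List.length_cons, hr, List.foldl_cons, List.foldl_map]
      have hbody : (fun (m : Int) (k : Nat) => min m (d + fSplit (ch :: t) k.succ))
          = fun m k => min m ((d + (if ch = 'w' then 1 else 0)) + fSplit t k) := by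
        funext m k
        simp only [Nat.succ_eq_add_one, fSplit_succ]
        congr 1
        ring
      rw [hbody, ih]
      rw [fSplit_zero]
      have hspec : specMin (ch :: t)
          = min (Gc (ch :: t)) ((if ch = 'w' then 1 else 0) + specMin t) := rfl
      rw [hspec]
      omega

-- B-side invariant: folding the one-pass step from cost d + Gc t with current best m ≤ cost
lemma foldl_step (t : List Char) : ∀ (d m : Int), m ≤ d + Gc t →
    ((t.foldl bstep (d + Gc t, m)).2) = min m (d + specMin t) := by
  induction t with
  | nil =>
      intro d m hm
      simp [specMin, Gc] at hm ⊢
      omega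
  | cons ch t ih =>
      intro d m hm
      have hle := specMin_le_G t
      rw [List.foldl_cons]
      rcases eq_or_ne ch 'g' with h | h
      · subst h
        have hg' : Gc ('g' :: t) = 1 + Gc t := by simpa using Gc_cons 'g' t
        rw [bstep_g]
        have hc : d + Gc ('g' :: t) - 1 = d + Gc t := by omega
        rw [hc]
        rw [ih d (if d + Gc t < m then d + Gc t else m) (by split_ifs <;> omega)]
        have hsp : specMin ('g' :: t) = min (Gc ('g' :: t)) (specMin t) := by
          simp [specMin]
        rw [hsp]
        split_ifs <;> omega
      · rcases eq_or_ne ch 'w' with h2 | h2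
        · subst h2
          have hg' : Gc ('w' :: t) = Gc t := by
            rw [Gc_cons, if_neg (by decide : ¬('w' : Char) = 'g')]; ring
          rw [bstep_w]
          have hc : d + Gc ('w' :: t) + 1 = (d + 1) + Gc t := by omega
          rw [hc]
          rw [ih (d + 1) (if (d + 1) + Gc t < m then (d + 1) + Gc t else m)
            (by split_ifs <;> omega)]
          have hsp : specMin ('w' :: t) = min (Gc ('w' :: t)) (1 + specMin t) := by
            simp [specMin]
          rw [hsp]
          split_ifs <;> omega
        · have hg' : Gc (ch :: t) = Gc t := by
            rw [Gc_cons, if_neg h]; ring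
          rw [bstep_o ch _ _ h h2]
          have hc : d + Gc (ch :: t) = d + Gc t := by omega
          rw [hc]
          rw [ih d (if d + Gc t < m then d + Gc t else m) (by split_ifs <;> omega)]
          have hsp : specMin (ch :: t) = min (Gc (ch :: t)) (specMin t) := by
            simp [specMin, h2]
          rw [hsp]
          split_ifs <;> omega

lemma solveA_eq (input : String) :
    solve input = PySem.Int.toStr (specMin input.toList) := by
  simp only [solve]
  have hlen : PySem.Str.len input = (input.toList.length : Int) := by
    simp [PySem.Str.len_eq]
  rw [hlen, PySem.List.pyRange_one]
  have ht : (((input.toList.length : Int) + 1) - 0).toNat = input.toList.length + 1 := by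
    omega
  rw [ht, List.foldl_map]
  have hcong : (List.range (input.toList.length + 1)).foldl
      (fun (x : Int) (y : Nat) =>
        (fun min_replace s =>
          let replace : Int :=
            (PySem.List.slice input.toList (some s) none).foldl
              (fun r ch => if ch = 'g' then r + 1 else r) 0
          let replace2 : Int :=
            (PySem.List.slice input.toList none (some s)).foldl
              (fun r ch => if ch = 'w' then r + 1 else r) replace
          if replace2 < min_replace then replace2 else min_replace) x ((0 : Int) + (y : Nat)))
      ((input.toList.length : Int))
      = (List.range (input.toList.length + 1)).foldl
        (fun m k => min m ((0 : Int) + fSplit input.toList k))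
        ((input.toList.length : Int)) := by
    apply PySem.List.foldl_congr_mem
    intro acc k hk
    simp only [zero_add]
    rw [PySem.List.slice_from_natCast, PySem.List.slice_to_natCast,
      PySem.List.foldl_ite_add_one, PySem.List.foldl_ite_add_one]
    show (if (0 + (Gc (input.toList.drop k)) + (Wc (input.toList.take k))) < acc
        then _ else acc) = min acc (fSplit input.toList k)
    unfold fSplit Gc Wc
    split_ifs <;> omega
  rw [hcong, foldl_min_range]
  have h1 := specMin_le_G input.toList
  have h2 := Gc_le_len input.toList
  have hmin : min ((input.toList.length : Int)) ((0 : Int) + specMin input.toList)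
      = specMin input.toList := by omega
  rw [hmin]

lemma solveB_eq (input : String) :
    solve_alt input = PySem.Int.toStr (specMin input.toList) := by
  simp only [solve_alt]
  rw [show (fun (p : Int × Int) ch =>
      let c : Int := if ch = 'g' then p.1 - 1 else if ch = 'w' then p.1 + 1 else p.1
      (c, if c < p.2 then c else p.2)) = bstep from rfl]
  rw [show ((input.toList.count 'g' : Nat) : Int) = Gc input.toList from count_g_eq _]
  cases hl : input.toList with
  | nil => simp [specMin, Gc]
  | cons ch t =>
      simp only [List.foldl_cons]
      have hle := specMin_le_G t
      rcases eq_or_ne ch 'g' with h | h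
      · subst h
        have hg' : Gc ('g' :: t) = 1 + Gc t := by simpa using Gc_cons 'g' t
        rw [bstep_g]
        have hc : Gc ('g' :: t) - 1 = (0 : Int) + Gc t := by omega
        rw [hc]
        rw [foldl_step t 0
          (if (0 : Int) + Gc t < Gc ('g' :: t) then (0 : Int) + Gc t else Gc ('g' :: t))
          (by split_ifs <;> omega)]
        have hsp : specMin ('g' :: t) = min (Gc ('g' :: t)) (specMin t) := by
          simp [specMin]
        rw [hsp]
        congr 1
        split_ifs <;> omega
      · rcases eq_or_ne ch 'w' with h2 | h2
        · subst h2
          have hg' : Gc ('w' :: t) = Gc t := by rw [Gc_cons, if_neg (by decide : ¬('w' : Char) = 'g')]; ring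
          rw [bstep_w]
          have hc : Gc ('w' :: t) + 1 = (1 : Int) + Gc t := by omega
          rw [hc]
          rw [foldl_step t 1
            (if (1 : Int) + Gc t < Gc ('w' :: t) then (1 : Int) + Gc t else Gc ('w' :: t))
            (by split_ifs <;> omega)]
          have hsp : specMin ('w' :: t) = min (Gc ('w' :: t)) (1 + specMin t) := by
            simp [specMin]
          rw [hsp]
          congr 1
          split_ifs <;> omega
        · have hg' : Gc (ch :: t) = Gc t := by rw [Gc_cons, if_neg h]; ring
          rw [bstep_o ch _ _ h h2]
          have hc : Gc (ch :: t) = (0 : Int) + Gc t := by omega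
          rw [hc]
          rw [foldl_step t 0
            (if (0 : Int) + Gc t < (0 : Int) + Gc t then (0 : Int) + Gc t else (0 : Int) + Gc t)
            (by split_ifs <;> omega)]
          have hsp : specMin (ch :: t) = min (Gc (ch :: t)) (specMin t) := by
            simp [specMin, h2]
          rw [hsp]
          congr 1
          split_ifs <;> omega

-- ===== VERDICT (by name: the statement is the Claim_ definition above) =====
theorem solve_spec : Claim_equal_solve := by
  intro input _
  unfold Spec_solve
  rw [solveA_eq, solveB_eq]
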